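-- pv_equiv track=rewrite | github.com/Nandinigarg2602/productathon | xgboost_model.py | extract_username_features
-- ===== SOURCE A (Python) =====
-- def extract_username_features(username):
--     s = str(username)
--     return {
--         "username_len": len(s),
--         "username_sum_ord": sum(ord(c) for c in s),
--         "num_digits": sum(c.isdigit() for c in s),
--         "num_letters": sum(c.isalpha() for c in s),
--     }
-- ===== SOURCE B (Python) =====
-- def _feat(s):
--     # divide and conquer: combine feature tuples of the two halves
--     if len(s) == 0:
--         return (0, 0, 0, 0)
--     if len(s) == 1:
--         return (1, ord(s), 1 if s.isdigit() else 0, 1 if s.isalpha() else 0)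
--     m = len(s) // 2
--     a = _feat(s[:m])
--     b = _feat(s[m:])
--     return (a[0] + b[0], a[1] + b[1], a[2] + b[2], a[3] + b[3])
--
--
-- def extract_username_features(username):
--     s = str(username)
--     n, sum_ord, num_digits, num_letters = _feat(s)
--     return {
--         "username_len": n,
--         "username_sum_ord": sum_ord,
--         "num_digits": num_digits,
--         "num_letters": num_letters,
--     }
-- ===== Notes on version B (the rewrite author's own statement) =====
-- stated objective: alternative
-- what changed: B computes the four features by a divide-and-conquer recursion that splits the string in half and combines the two halves' feature tuples, instead of A's four independent linear comprehension passes.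
import Mathlib
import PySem

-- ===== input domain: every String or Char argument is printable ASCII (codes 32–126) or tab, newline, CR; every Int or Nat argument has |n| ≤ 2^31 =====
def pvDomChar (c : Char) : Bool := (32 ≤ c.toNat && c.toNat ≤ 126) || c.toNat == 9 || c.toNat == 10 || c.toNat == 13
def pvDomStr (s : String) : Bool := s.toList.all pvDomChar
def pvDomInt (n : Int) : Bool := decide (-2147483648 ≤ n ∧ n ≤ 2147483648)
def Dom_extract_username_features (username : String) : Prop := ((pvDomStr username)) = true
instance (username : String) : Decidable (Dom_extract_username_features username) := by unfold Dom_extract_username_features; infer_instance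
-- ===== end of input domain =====

-- B replaces A's four independent linear passes by a divide-and-conquer recursion
-- splitting the string in half and adding the halves' feature tuples ("alternative").

-- ===== PORT A =====
-- str(username) on a str is the identity; the four dict entries are four independent scans of s.
def extract_username_features (username : String) : List (String × Int) :=
  let s := username.toList
  [("username_len", PySem.Str.len username),
   ("username_sum_ord", (s.map (fun c => (c.toNat : Int))).sum),
   ("num_digits", (s.map (fun c => if PySem.Chars.isdigit c then (1 : Int) else 0)).sum),
   ("num_letters", (s.map (fun c => if PySem.Chars.isalpha c then (1 : Int) else 0)).sum)]

-- ===== PORT B =====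
-- _feat: divide and conquer on the character list (s[:m]/s[m:] = take/drop at len//2)
def pvFeat : List Char → Int × Int × Int × Int
  | [] => (0, 0, 0, 0)
  | [c] => (1, (c.toNat : Int),
            if PySem.Chars.isdigit c then 1 else 0,
            if PySem.Chars.isalpha c then 1 else 0)
  | x :: y :: rest =>
    let m := (x :: y :: rest).length / 2
    let a := pvFeat ((x :: y :: rest).take m)
    let b := pvFeat ((x :: y :: rest).drop m)
    (a.1 + b.1, a.2.1 + b.2.1, a.2.2.1 + b.2.2.1, a.2.2.2 + b.2.2.2)
termination_by l => l.length
decreasing_by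
  · simp [List.length_take]; omega
  · simp [List.length_drop]; omega

def extract_username_features_alt (username : String) : List (String × Int) :=
  let r := pvFeat username.toList
  [("username_len", r.1),
   ("username_sum_ord", r.2.1),
   ("num_digits", r.2.2.1),
   ("num_letters", r.2.2.2)]

-- ===== PRECONDITION & SPEC =====
def Spec_extract_username_features (username : String) (out : List (String × Int)) : Prop := out = extract_username_features_alt username
instance (username : String) (out : List (String × Int)) : Decidable (Spec_extract_username_features username out) := by unfold Spec_extract_username_features; infer_instance

-- ===== CLAIM (what is proved, stated in full; the proofs are below) =====
def Claim_equal_extract_username_features : Prop := ∀ (username : String), Dom_extract_username_features username → Spec_extract_username_features username (extract_username_features username)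

-- ===== LEMMAS AND PROOFS =====
theorem pvFeat_eq (l : List Char) :
    pvFeat l = ((l.length : Int),
      (l.map (fun c => (c.toNat : Int))).sum,
      (l.map (fun c => if PySem.Chars.isdigit c then (1 : Int) else 0)).sum,
      (l.map (fun c => if PySem.Chars.isalpha c then (1 : Int) else 0)).sum) := by
  induction l using pvFeat.induct with
  | case1 => simp [pvFeat]
  | case2 c => simp [pvFeat]
  | case3 x y rest m iha ihb =>
      have hsplit : (x :: y :: rest) = (x :: y :: rest).take m ++ (x :: y :: rest).drop m :=
        (List.take_append_drop m _).symm
      simp only [pvFeat]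
      rw [iha, ihb]
      refine Prod.ext ?_ (Prod.ext ?_ (Prod.ext ?_ ?_)) <;>
        · simp only []
          conv_rhs => rw [hsplit]
          simp
          try omega

-- ===== VERDICT (by name: the statement is the Claim_ definition above) =====
theorem extract_username_features_spec : Claim_equal_extract_username_features := by
  intro username _
  unfold Spec_extract_username_features extract_username_features extract_username_features_alt
  simp [pvFeat_eq, PySem.Str.len]
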